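-- pv_equiv track=rewrite | github.com/AiZhanghan/Leetcode | 秋招/网易互联网（有道）/3.py | least_need_second
-- ===== SOURCE A (Python) =====
-- def least_need_second(a, b):
--     """
--     Args:
--         a: list[int]
--         b: list[int]
--
--     Return:
--         int
--     """
--     # dp[0][i], i客户和i - 1分开买所需最少时间
--     # dp[1][i], i客户和i - 1一起买所需最少时间
--     dp = [[0 for _ in range(len(b))] for _ in range(2)]
--     dp[0][0] = a[0] + a[1]
--     dp[1][0] = b[0]
--
--     for i in range(1, len(dp[0])):
--         dp[0][i] = min(dp[0][i - 1], dp[1][i - 1]) + a[i + 1]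
--         dp[1][i] = dp[0][i - 1] - a[i] + b[i]
--
--     return min(dp[0][-1], dp[1][-1])
-- ===== SOURCE B (Python) =====
-- def least_need_second(a, b):
--     """
--     Args:
--         a: list[int]
--         b: list[int]
--
--     Return:
--         int
--     """
--     # Problem transformation instead of min-cost DP: buying everyone separately
--     # costs baseline = a[0] + a[1] + ... + a[n].  Pairing customer i with i-1
--     # replaces a[i] + a[i+1] by b[i], a gain of g[i] = a[i] + a[i+1] - b[i],
--     # and two pairings may not share a customer, i.e. the chosen indices must be
--     # non-adjacent.  So the answer is baseline minus the maximum-weight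
--     # independent set of g on a path (the classic "house robber" maximum).
--     n = len(b)
--     gains = [a[i] + a[i + 1] - b[i] for i in range(n)]
--     baseline = sum(a[:n + 1])
--     take, skip = 0, 0
--     for g in gains:
--         take, skip = max(take, skip + g), take
--     return baseline - take
-- ===== Notes on version B (the rewrite author's own statement) =====
-- stated objective: alternative
-- what changed: Replaces the two-state min-cost DP table by a problem transformation: the all-separate baseline (a prefix sum of a) minus the maximum-weight independent set (house-robber maximum) over the pairing gains g[i] = a[i]+a[i+1]-b[i].
import Mathlib
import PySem

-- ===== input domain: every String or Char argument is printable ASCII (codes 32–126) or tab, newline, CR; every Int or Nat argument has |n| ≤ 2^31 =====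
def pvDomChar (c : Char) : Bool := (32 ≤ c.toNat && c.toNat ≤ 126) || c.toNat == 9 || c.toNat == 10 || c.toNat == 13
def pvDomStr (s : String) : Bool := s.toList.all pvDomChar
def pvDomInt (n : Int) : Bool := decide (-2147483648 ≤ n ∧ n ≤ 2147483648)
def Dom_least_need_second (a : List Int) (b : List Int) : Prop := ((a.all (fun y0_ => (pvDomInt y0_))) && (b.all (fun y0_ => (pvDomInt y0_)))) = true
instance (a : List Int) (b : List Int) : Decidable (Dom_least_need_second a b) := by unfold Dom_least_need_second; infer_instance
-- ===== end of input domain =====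

-- B recasts A's min-cost DP as the all-separate baseline minus a maximum-weight independent set over pairing gains (alternative algorithm, same cost).

-- ===== PORT A =====
def least_need_second (a : List Int) (b : List Int) : Int :=
  let n := b.length
  let dp0 := (List.replicate n (0:Int)).set 0 (a.getD 0 0 + a.getD 1 0)
  let dp1 := (List.replicate n (0:Int)).set 0 (b.getD 0 0)
  let st := (PySem.List.pyRange 1 (n:Int) 1).foldl
    (fun (st : List Int × List Int) (i : Int) =>
      let d0 := st.1.set i.toNat
        (min (st.1.getD (i-1).toNat 0) (st.2.getD (i-1).toNat 0) + a.getD (i+1).toNat 0)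
      let d1 := st.2.set i.toNat
        (d0.getD (i-1).toNat 0 - a.getD i.toNat 0 + b.getD i.toNat 0)
      (d0, d1)) (dp0, dp1)
  min (PySem.List.pyGetD st.1 (-1) 0) (PySem.List.pyGetD st.2 (-1) 0)

-- ===== PORT B =====
def least_need_second_alt (a : List Int) (b : List Int) : Int :=
  let n := b.length
  let gains := (List.range n).map (fun i => a.getD i 0 + a.getD (i+1) 0 - b.getD i 0)
  let baseline := (a.take (n+1)).sum
  let st := gains.foldl (fun (st : Int × Int) (g : Int) => (max st.1 (st.2 + g), st.1)) (0, 0)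
  baseline - st.1

-- ===== PRECONDITION & SPEC =====
-- Pre_: A raises IndexError when b is empty (dp[1][0] = b[0]) or when len(a) < len(b)+1 (a[0], a[1] or a[i+1]).
def Pre_least_need_second (a : List Int) (b : List Int) : Prop :=
  b ≠ [] ∧ b.length + 1 ≤ a.length
instance (a : List Int) (b : List Int) : Decidable (Pre_least_need_second a b) := by
  unfold Pre_least_need_second; infer_instance

def pvWitness_least_need_second : List Int × List Int := ([1, 5, 2], [3, 4])

def Spec_least_need_second (a : List Int) (b : List Int) (out : Int) : Prop := out = least_need_second_alt a b
instance (a : List Int) (b : List Int) (out : Int) : Decidable (Spec_least_need_second a b out) := by unfold Spec_least_need_second; infer_instance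

-- ===== CLAIM (what is proved, stated in full; the proofs are below) =====
def Claim_equal_least_need_second : Prop := ∀ (a : List Int) (b : List Int), Dom_least_need_second a b → Pre_least_need_second a b → Spec_least_need_second a b (least_need_second a b)

-- ===== LEMMAS AND PROOFS =====

-- Proof-only reference recursion: F a b i = (cost with i bought separately, cost with i bought with i-1).
def F (a : List Int) (b : List Int) : Nat → Int × Int
  | 0 => (a.getD 0 0 + a.getD 1 0, b.getD 0 0)
  | j + 1 =>
    let p := F a b j
    (min p.1 p.2 + a.getD (j+2) 0, p.1 - a.getD (j+1) 0 + b.getD (j+1) 0)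

theorem getD_set_ne (l : List Int) (i j : Nat) (v : Int) (h : i ≠ j) :
    (l.set i v).getD j 0 = l.getD j 0 := by
  simp [List.getD_eq_getElem?_getD, List.getElem?_set_ne h]

theorem getD_set_self (l : List Int) (i : Nat) (v : Int) (h : i < l.length) :
    (l.set i v).getD i 0 = v := by
  simp [List.getD_eq_getElem?_getD, h]

-- invariant for A's fold
theorem A_inv (a b : List Int) (m : Nat) (h1 : 1 ≤ m) (h2 : m ≤ b.length) :
    (let n := b.length
     let st := (PySem.List.pyRange 1 (m:Int) 1).foldl
      (fun (st : List Int × List Int) (i : Int) =>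
        let d0 := st.1.set i.toNat
          (min (st.1.getD (i-1).toNat 0) (st.2.getD (i-1).toNat 0) + a.getD (i+1).toNat 0)
        let d1 := st.2.set i.toNat
          (d0.getD (i-1).toNat 0 - a.getD i.toNat 0 + b.getD i.toNat 0)
        (d0, d1))
      ((List.replicate n (0:Int)).set 0 (a.getD 0 0 + a.getD 1 0),
       (List.replicate n (0:Int)).set 0 (b.getD 0 0))
     st.1.length = b.length ∧ st.2.length = b.length ∧
       ∀ j : Nat, j < m → st.1.getD j 0 = (F a b j).1 ∧ st.2.getD j 0 = (F a b j).2) := by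
  dsimp only
  induction m with
  | zero => omega
  | succ k ih =>
    by_cases hk : k < 1
    · have hk0 : k = 0 := by omega
      subst hk0
      have hb : 0 < b.length := by omega
      rw [show (((0:Nat)+1 : Nat) : Int) = 1 by norm_num,
         PySem.List.pyRange_one_eq_nil (le_refl (1:Int))]
      simp only [List.foldl_nil]
      refine ⟨by simp, by simp, ?_⟩
      intro j hj
      have hj0 : j = 0 := by omega
      subst hj0
      constructor
      · rw [getD_set_self _ _ _ (by simpa using hb)]; rfl
      · rw [getD_set_self _ _ _ (by simpa using hb)]; rfl
    · have hk1 : 1 ≤ k := by omega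
      have hsplit : PySem.List.pyRange 1 ((k:Int)+1) 1 = PySem.List.pyRange 1 (k:Int) 1 ++ [(k:Int)] :=
        PySem.List.pyRange_one_succ_right (by exact_mod_cast hk1)
      obtain ⟨hl0, hl1, hget⟩ := ih hk1 (by omega)
      push_cast
      rw [hsplit, List.foldl_append]
      simp only [List.foldl_cons, List.foldl_nil]
      have e1 : ((k:Int) - 1).toNat = k - 1 := by omega
      have e0 : ((k:Int)).toNat = k := by omega
      have e2 : ((k:Int) + 1).toNat = k + 1 := by omega
      rw [e1, e0, e2]
      set st := (PySem.List.pyRange 1 (k:Int) 1).foldl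
        (fun (st : List Int × List Int) (i : Int) =>
          let d0 := st.1.set i.toNat
            (min (st.1.getD (i-1).toNat 0) (st.2.getD (i-1).toNat 0) + a.getD (i+1).toNat 0)
          let d1 := st.2.set i.toNat
            (d0.getD (i-1).toNat 0 - a.getD i.toNat 0 + b.getD i.toNat 0)
          (d0, d1))
        ((List.replicate b.length (0:Int)).set 0 (a.getD 0 0 + a.getD 1 0),
         (List.replicate b.length (0:Int)).set 0 (b.getD 0 0)) with hst
      have hkn : k < b.length := by omega
      have hkl0 : k < st.1.length := by omega
      have hkl1 : k < st.2.length := by omega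
      obtain ⟨jk, rfl⟩ : ∃ jk, k = jk + 1 := ⟨k - 1, by omega⟩
      have hprev := hget jk (by omega)
      refine ⟨by simp [hl0], by simp [hl1], ?_⟩
      intro j hj
      by_cases hjk : j = jk + 1
      · subst hjk
        constructor
        · dsimp only
          rw [getD_set_self _ _ _ hkl0,
              show jk + 1 - 1 = jk from rfl, hprev.1, hprev.2]
          simp [F]
        · dsimp only
          rw [getD_set_self _ _ _ (by simpa using hkl1),
              getD_set_ne _ _ _ _ (by omega),
              show jk + 1 - 1 = jk from rfl, hprev.1]
          simp [F]
      · have hjlt : j < jk + 1 := by omega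
        have := hget j hjlt
        constructor
        · dsimp only
          rw [getD_set_ne _ _ _ _ (by omega)]
          exact this.1
        · dsimp only
          rw [getD_set_ne _ _ _ _ (by omega)]
          exact this.2

theorem A_eq (a b : List Int) (h : 1 ≤ b.length) :
    least_need_second a b = min (F a b (b.length - 1)).1 (F a b (b.length - 1)).2 := by
  obtain ⟨hl0, hl1, hget⟩ := A_inv a b b.length h le_rfl
  obtain ⟨h0, h1⟩ := hget (b.length - 1) (by omega)
  unfold least_need_second
  dsimp only
  rw [PySem.List.pyGetD_neg_ofNat _ 1 0 (by norm_num) (by rw [hl0]; omega),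
      PySem.List.pyGetD_neg_ofNat _ 1 0 (by norm_num) (by rw [hl1]; omega)]
  simp only [hl0, hl1]
  have hlt0 : b.length - 1 < _ := lt_of_lt_of_le (Nat.sub_lt h Nat.one_pos) (le_of_eq hl0.symm)
  have hlt1 : b.length - 1 < _ := lt_of_lt_of_le (Nat.sub_lt h Nat.one_pos) (le_of_eq hl1.symm)
  rw [(List.getD_eq_getElem _ 0 hlt0).symm.trans h0,
      (List.getD_eq_getElem _ 0 hlt1).symm.trans h1]

theorem sum_take_one (a : List Int) (h : 1 ≤ a.length) :
    (a.take 1).sum = a.getD 0 0 := by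
  cases a with
  | nil => simp at h
  | cons x xs => simp

-- invariant for B's house-robber fold: after m steps the state is
-- (baseline_{m-1} - min(s_{m-1}, t_{m-1}), baseline_{m-1} - s_{m-1}) with (s,t) = F.
theorem B_inv (a b : List Int) (hlen : b.length + 1 ≤ a.length) (m : Nat)
    (h1 : 1 ≤ m) (h2 : m ≤ b.length) :
    ((List.range m).map (fun i => a.getD i 0 + a.getD (i+1) 0 - b.getD i 0)).foldl
      (fun (st : Int × Int) (g : Int) => (max st.1 (st.2 + g), st.1)) (0, 0)
    = ((a.take (m+1)).sum - min (F a b (m-1)).1 (F a b (m-1)).2,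
       (a.take (m+1)).sum - (F a b (m-1)).1) := by
  induction m with
  | zero => omega
  | succ k ih =>
    rw [List.range_succ, List.map_append, List.foldl_append]
    have hsum : (a.take (k+2)).sum = (a.take (k+1)).sum + a.getD (k+1) 0 := by
      have hk1 : k + 1 < a.length := by omega
      rw [List.take_add_one, List.sum_append, List.getElem?_eq_getElem hk1,
          List.getD_eq_getElem _ 0 hk1]
      simp
    by_cases hk : k < 1
    · have hk0 : k = 0 := by omega
      subst hk0
      simp only [List.range_zero, List.map_nil, List.foldl_nil, List.map_cons,
        List.foldl_cons]
      rw [hsum, sum_take_one a (by omega)]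
      simp only [F, zero_add, Prod.mk.injEq]
      constructor <;> omega
    · have hk1 : 1 ≤ k := by omega
      rw [ih hk1 (by omega)]
      obtain ⟨j, rfl⟩ : ∃ j, k = j + 1 := ⟨k - 1, by omega⟩
      simp only [List.map_cons, List.map_nil, List.foldl_cons, List.foldl_nil]
      rw [hsum]
      simp only [show j + 1 - 1 = j from rfl, show j + 1 + 1 - 1 = j + 1 from rfl,
        show j + 1 + 1 = j + 2 from rfl]
      simp only [F, Prod.mk.injEq]
      constructor <;> omega

theorem B_eq (a b : List Int) (hlen : b.length + 1 ≤ a.length) (h : 1 ≤ b.length) :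
    least_need_second_alt a b = min (F a b (b.length - 1)).1 (F a b (b.length - 1)).2 := by
  unfold least_need_second_alt
  dsimp only
  rw [B_inv a b hlen b.length h le_rfl]
  ring

-- ===== VERDICT (by name: the statement is the Claim_ definition above) =====
theorem least_need_second_spec : Claim_equal_least_need_second := by
  intro a b _ hpre
  obtain ⟨hne, hlen⟩ := hpre
  have hb : 1 ≤ b.length := by
    cases b with
    | nil => exact absurd rfl hne
    | cons x xs => simp
  show least_need_second a b = least_need_second_alt a b
  rw [A_eq a b hb, B_eq a b hlen hb]
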